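-- pv_equiv track=rewrite | github.com/JohnsonLu3/Coding-Challenge | Find Longest Subsequence in String/FindLongestSubsequenceInString.py | mapString
-- ===== SOURCE A (Python) =====
-- def mapString(S):
--
--     dict = {}
--
--     for n in range(0, len(S)):
--
--         letter = S[n]
--
--         if letter not in dict:
--             positions = []
--             positions.append(n)
--             dict[letter] = positions
--
--         else:
--             dict[letter].append(n)
--
--     return dict
-- ===== SOURCE B (Python) =====
-- def mapString(S):
--     # One dict comprehension over the distinct characters (first-occurrence order),
--     # each rescanning S with enumerate to collect that character's positions.
--     return {c: [i for i, ch in enumerate(S) if ch == c] for c in dict.fromkeys(S)}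
-- ===== Notes on version B (the rewrite author's own statement) =====
-- stated objective: idiomatic
-- what changed: A builds the dict in one accumulating indexed pass with insert-or-append branching; B instead iterates over the distinct characters (dict.fromkeys order) and gathers each character's positions by a fresh enumerate scan, as a single dict comprehension.
import Mathlib
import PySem

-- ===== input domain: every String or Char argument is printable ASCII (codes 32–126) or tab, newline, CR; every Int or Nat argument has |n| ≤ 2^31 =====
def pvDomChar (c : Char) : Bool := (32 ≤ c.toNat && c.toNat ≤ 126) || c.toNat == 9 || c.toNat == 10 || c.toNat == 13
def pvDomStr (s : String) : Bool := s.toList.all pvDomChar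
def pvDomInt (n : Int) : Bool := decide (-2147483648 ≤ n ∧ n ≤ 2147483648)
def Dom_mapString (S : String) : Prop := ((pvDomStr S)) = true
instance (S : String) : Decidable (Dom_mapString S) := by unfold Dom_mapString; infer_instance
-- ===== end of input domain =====

-- B iterates the distinct characters and rescans S for each; A makes one accumulating pass.
-- Python's 1-char strings S[n] are Chars here; both ports wrap keys as singleton Strings at the boundary.

-- ===== PORT A =====
-- one indexed pass: for n in range(0, len(S)): insert [n] for a fresh letter, else append n
def mapString (S : String) : List (String × List Int) :=
  ((PySem.List.pyRange 0 (PySem.Str.len S) 1).foldl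
    (fun d n =>
      match PySem.Str.pyGet? S n with
      | some letter =>
        if d.contains letter = false then
          d.insert letter [n]
        else
          d.modify letter [] (fun positions => positions ++ [n])
      | none => d)   -- unreachable: n is a valid index
    PySem.Dict.empty).items.map (fun p => (String.ofList [p.1], p.2))

-- ===== PORT B =====
-- {c: [i for i, ch in enumerate(S) if ch == c] for c in dict.fromkeys(S)}
def mapString_alt (S : String) : List (String × List Int) :=
  (PySem.List.dedup S.toList).map (fun c =>
    (String.ofList [c],
     (PySem.List.enumerate S.toList).filterMap
       (fun p => if p.2 = c then some p.1 else none)))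

-- ===== PRECONDITION & SPEC =====
def Spec_mapString (S : String) (out : List (String × List Int)) : Prop := out = mapString_alt S
instance (S : String) (out : List (String × List Int)) : Decidable (Spec_mapString S out) := by unfold Spec_mapString; infer_instance

-- ===== CLAIM (what is proved, stated in full; the proofs are below) =====
def Claim_equal_mapString : Prop := ∀ (S : String), Dom_mapString S → Spec_mapString S (mapString S)

-- ===== LEMMAS AND PROOFS =====

-- the filtered comprehension, as filter-then-project
theorem pvFilterMap_eq (c : Char) (l : List (Int × Char)) :
    (l.filter (fun p => p.2 == c)).map (fun p => p.1) =
      l.filterMap (fun p => if p.2 = c then some p.1 else none) := by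
  induction l with
  | nil => simp
  | cons x xs ih =>
    by_cases h : x.2 = c <;> simp [h, ih]

-- A's body collapses to a single modify
theorem pvBody_eq (d : PySem.Dict Char (List Int)) (c : Char) (n : Int) :
    (if d.contains c = false then d.insert c [n]
     else d.modify c [] (fun positions => positions ++ [n]))
      = d.modify c [] (fun positions => positions ++ [n]) := by
  by_cases h : d.contains c = false
  · simp [h, PySem.Dict.modify, PySem.Dict.getD_of_not_contains d [] h]
  · simp [h]

-- A's indexed loop is the modify-fold over enumerate S.toList
theorem pvLoop_eq (S : String) :
    ((PySem.List.pyRange 0 (PySem.Str.len S) 1).foldl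
      (fun d n =>
        match PySem.Str.pyGet? S n with
        | some letter =>
          if d.contains letter = false then
            d.insert letter [n]
          else
            d.modify letter [] (fun positions => positions ++ [n])
        | none => d)
      PySem.Dict.empty)
    = (PySem.List.enumerate S.toList).foldl
        (fun d p => d.modify p.2 [] (fun positions => positions ++ [p.1]))
        PySem.Dict.empty := by
  rw [PySem.List.enumerate_eq_map_pyRange S.toList ' ', List.foldl_map]
  rw [show PySem.Str.len S = PySem.List.len S.toList from PySem.Str.len_eq S]
  apply PySem.List.foldl_congr_mem
  intro d j hj
  rw [PySem.List.mem_pyRange_one] at hj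
  obtain ⟨h0, h1⟩ := hj
  have h1' : j < (S.toList.length : Int) := h1
  have hjl : j.toNat < S.toList.length := by omega
  have hg : PySem.Str.pyGet? S j = some (S.toList[j.toNat]) := by
    show PySem.Chars.pyGet? S.toList j = some (S.toList[j.toNat])
    rw [show PySem.Chars.pyGet? = PySem.List.pyGet? from rfl,
      PySem.List.pyGet?_of_nonneg _ h0, List.getElem?_eq_getElem hjl]
  have hd : PySem.List.pyGetD S.toList j ' ' = S.toList[j.toNat] :=
    PySem.List.pyGetD_eq_getElem _ _ h0 h1'
  rw [hg, hd]
  exact pvBody_eq d (S.toList[j.toNat]) j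

-- ===== VERDICT (by name: the statement is the Claim_ definition above) =====
theorem mapString_spec : Claim_equal_mapString := by
  intro S _
  unfold Spec_mapString mapString mapString_alt
  rw [pvLoop_eq]
  set cs := S.toList with hcs
  have hswap :
      (PySem.List.enumerate cs).foldl
        (fun d p => d.modify p.2 [] (fun positions => positions ++ [p.1]))
        PySem.Dict.empty
      = ((PySem.List.enumerate cs).map Prod.swap).foldl
          (fun d q => d.modify q.1 [] (fun positions => positions ++ [q.2]))
          PySem.Dict.empty := by
    rw [List.foldl_map]; rfl
  have hkeys :
      ((PySem.List.enumerate cs).foldl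
        (fun d p => d.modify p.2 [] (fun positions => positions ++ [p.1]))
        PySem.Dict.empty).keys = PySem.List.dedup cs := by
    rw [PySem.Dict.keys_foldl_modify_key (PySem.List.enumerate cs) Prod.snd []
      (fun d p v => v ++ [p.1]) PySem.Dict.empty]
    simp [PySem.List.map_snd_enumerate, PySem.Dict.keys_empty,
      PySem.Set.update_nil_left]
  have hnodup :
      ((PySem.List.enumerate cs).foldl
        (fun d p => d.modify p.2 [] (fun positions => positions ++ [p.1]))
        PySem.Dict.empty).keys.Nodup :=
    PySem.Dict.nodup_keys_foldl_modify_key (PySem.List.enumerate cs) Prod.snd []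
      (fun d p v => v ++ [p.1]) PySem.Dict.empty (by simp [PySem.Dict.keys_empty])
  rw [PySem.Dict.items_eq_map_keys _ hnodup [], hkeys, List.map_map]
  apply List.map_congr_left
  intro c hc
  have hget :
      ((PySem.List.enumerate cs).foldl
        (fun d p => d.modify p.2 [] (fun positions => positions ++ [p.1]))
        PySem.Dict.empty).getD c []
      = (PySem.List.enumerate cs).filterMap
          (fun p => if p.2 = c then some p.1 else none) := by
    rw [hswap, PySem.Dict.getD_foldl_modify_append]
    simp only [PySem.Dict.getD_empty, List.nil_append, List.filter_map, List.map_map]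
    rw [← pvFilterMap_eq]
    rfl
  simp [hget]
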